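-- pv_equiv track=rewrite | github.com/pwmcclung/newCodeProbs | even_twins.py | even_twins
-- ===== SOURCE A (Python) =====
-- def even_twins(numbers):
--     arr = []
--     while len(numbers) != 0:
--         first = numbers.pop(0)
--         for x in numbers:
--             arr.append(first + x)
--     new_arr = [x for x in arr if x % 2 == 0]
--     return len(set(new_arr))
-- ===== SOURCE B (Python) =====
-- def even_twins(numbers):
--     # Only same-parity pairs have an even sum: partition by parity (popping,
--     # so numbers ends up empty as in A), then collect pair sums within each group.
--     evens = []
--     odds = []
--     while numbers:
--         v = numbers.pop(0)
--         if v % 2 == 0: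
--             evens.append(v)
--         else:
--             odds.append(v)
--     sums = set()
--     for group in (evens, odds):
--         while group:
--             v = group.pop(0)
--             for w in group:
--                 sums.add(v + w)
--     return len(sums)
-- ===== Notes on version B (the rewrite author's own statement) =====
-- stated objective: alternative
-- what changed: Instead of enumerating all pairs and filtering the even sums afterwards, B partitions the input by parity and forms pair sums only within each parity class (the only pairs whose sum is even), adding them directly into a set.
import Mathlib
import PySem

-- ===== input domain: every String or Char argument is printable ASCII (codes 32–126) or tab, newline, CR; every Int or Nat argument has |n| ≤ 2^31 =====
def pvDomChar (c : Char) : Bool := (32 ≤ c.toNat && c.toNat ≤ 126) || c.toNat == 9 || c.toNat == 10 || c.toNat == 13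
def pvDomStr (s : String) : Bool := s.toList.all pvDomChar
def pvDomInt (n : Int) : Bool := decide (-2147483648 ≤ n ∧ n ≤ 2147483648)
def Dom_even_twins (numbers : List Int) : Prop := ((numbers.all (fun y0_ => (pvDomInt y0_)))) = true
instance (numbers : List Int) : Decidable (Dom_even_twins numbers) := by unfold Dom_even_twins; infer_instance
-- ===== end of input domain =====

-- B partitions by parity and sums within each class instead of filtering all pair sums;
-- both Pythons empty `numbers` in place (the equivalence proved is about the return value,
-- and B performs the same mutation).

-- ===== PORT A =====
-- while numbers: first = numbers.pop(0); for x in numbers: arr.append(first + x)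
def aLoop : List Int → List Int → List Int
  | [], arr => arr
  | first :: rest, arr => aLoop rest (arr ++ rest.map (fun x => first + x))

def even_twins (numbers : List Int) : Int :=
  let arr := aLoop numbers []
  let new_arr := arr.filter (fun x => PySem.Int.mod x 2 == 0)
  ((PySem.Set.ofList new_arr).length : Int)

-- ===== PORT B =====
-- while numbers: v = numbers.pop(0); append v to evens or odds by parity
def bPart : List Int → List Int → List Int → List Int × List Int
  | [], evens, odds => (evens, odds)
  | v :: rest, evens, odds =>
      if PySem.Int.mod v 2 == 0 then bPart rest (evens ++ [v]) odds
      else bPart rest evens (odds ++ [v])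

-- while group: v = group.pop(0); for w in group: sums.add(v + w)
def bSums : List Int → PySem.Set Int → PySem.Set Int
  | [], sums => sums
  | v :: rest, sums => bSums rest (rest.foldl (fun s w => PySem.Set.add s (v + w)) sums)

def even_twins_alt (numbers : List Int) : Int :=
  let p := bPart numbers [] []
  let sums := bSums p.2 (bSums p.1 PySem.Set.empty)
  (sums.length : Int)

-- ===== PRECONDITION & SPEC =====
def Spec_even_twins (numbers : List Int) (out : Int) : Prop := out = even_twins_alt numbers
instance (numbers : List Int) (out : Int) : Decidable (Spec_even_twins numbers out) := by unfold Spec_even_twins; infer_instance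

-- ===== CLAIM (what is proved, stated in full; the proofs are below) =====
def Claim_equal_even_twins : Prop := ∀ (numbers : List Int), Dom_even_twins numbers → Spec_even_twins numbers (even_twins numbers)

-- ===== LEMMAS AND PROOFS =====

def evp (x : Int) : Bool := PySem.Int.mod x 2 == 0

-- sums of all i<j pairs, in A's order
def pairSums : List Int → List Int
  | [] => []
  | x :: xs => xs.map (fun y => x + y) ++ pairSums xs

theorem aLoop_eq (l arr : List Int) : aLoop l arr = arr ++ pairSums l := by
  induction l generalizing arr with
  | nil => simp [aLoop, pairSums]
  | cons x xs ih => simp [aLoop, pairSums, ih, List.append_assoc]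

theorem bPart_eq (l e o : List Int) :
    bPart l e o = (e ++ l.filter evp, o ++ l.filter (fun x => !evp x)) := by
  induction l generalizing e o with
  | nil => simp [bPart]
  | cons x xs ih =>
      by_cases h : evp x = true <;>
        simp [bPart, evp] at h ⊢ <;> simp [h, ih, List.append_assoc, evp]

theorem bSums_eq (l : List Int) (s : PySem.Set Int) :
    bSums l s = PySem.Set.update s (pairSums l) := by
  induction l generalizing s with
  | nil => rfl
  | cons x xs ih =>
      rw [bSums, ih, ← PySem.Set.update_map_eq_foldl_add, pairSums]
      simp only [PySem.Set.update, List.foldl_append]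

theorem update_ofList (xs ys : List Int) :
    PySem.Set.update (PySem.Set.ofList xs) ys = PySem.Set.ofList (xs ++ ys) := by
  simp [PySem.Set.ofList_eq_foldl, PySem.Set.update, List.foldl_append]

theorem evp_add (x y : Int) : evp (x + y) = (evp x == evp y) := by
  have h : ∀ z : Int, evp z = decide (2 ∣ z) := by
    intro z
    simp only [evp]
    rw [Bool.eq_iff_iff]
    simp [beq_iff_eq]
  simp only [h]
  by_cases hx : 2 ∣ x <;> by_cases hy : 2 ∣ y <;>
    simp [hx, hy] <;> omega

-- the even pair sums are, up to permutation, the pair sums within each parity class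
theorem filter_pairSums_perm (l : List Int) :
    ((pairSums l).filter evp).Perm
      (pairSums (l.filter evp) ++ pairSums (l.filter (fun x => !evp x))) := by
  induction l with
  | nil => simp [pairSums]
  | cons x xs ih =>
      rw [pairSums, List.filter_append, List.filter_map]
      by_cases h : evp x = true
      · have hmap : (List.filter (evp ∘ fun y => x + y) xs) = xs.filter evp := by
          apply List.filter_congr
          intro y _
          simp [Function.comp, evp_add, h]
        rw [hmap, List.filter_cons_of_pos h, pairSums, List.append_assoc]
        have hx' : (x :: xs).filter (fun x => !evp x) = xs.filter (fun x => !evp x) := by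
          simp [h]
        rw [hx']
        exact (ih.append_left _)
      · have h' : evp x = false := by simpa using h
        have hmap : (List.filter (evp ∘ fun y => x + y) xs)
            = xs.filter (fun y => !evp y) := by
          apply List.filter_congr
          intro y _
          simp [Function.comp, evp_add, h']
        rw [hmap, List.filter_cons_of_neg (by simp [h']), List.filter_cons_of_pos (by simp [h']),
          pairSums]
        refine (ih.append_left _).trans ?_
        rw [← List.append_assoc, ← List.append_assoc]
        exact (List.perm_append_comm).append_right _

theorem ofList_length_of_perm {l₁ l₂ : List Int} (h : l₁.Perm l₂) :
    (PySem.Set.ofList l₁).length = (PySem.Set.ofList l₂).length := by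
  have hp : (PySem.Set.ofList l₁).Perm (PySem.Set.ofList l₂) := by
    rw [List.perm_ext_iff_of_nodup (PySem.Set.nodup_ofList l₁) (PySem.Set.nodup_ofList l₂)]
    intro x
    simp [PySem.Set.mem_ofList, h.mem_iff]
  exact hp.length_eq

-- ===== VERDICT (by name: the statement is the Claim_ definition above) =====
theorem even_twins_spec : Claim_equal_even_twins := by
  intro numbers _
  unfold Spec_even_twins even_twins even_twins_alt
  rw [aLoop_eq, bPart_eq]
  simp only [List.nil_append]
  rw [bSums_eq, bSums_eq]
  rw [show (PySem.Set.empty : PySem.Set Int) = PySem.Set.ofList [] from rfl]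
  rw [update_ofList, List.nil_append, update_ofList]
  rw [show (fun x : Int => PySem.Int.mod x 2 == 0) = evp from rfl]
  rw [ofList_length_of_perm (filter_pairSums_perm numbers)]
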